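-- pv_equiv track=rewrite | github.com/nonemergang/Algos | SecondTest/task_9_tests.py | generate_large_test
-- ===== SOURCE A (Python) =====
-- def calculate_expected_output(commands):
--     """
--     Вычисляет ожидаемый вывод для заданного списка команд
--     """
--     phone_book = {}
--     expected = []
--
--     for command in commands:
--         parts = command.split()
--         cmd_type = parts[0]
--
--         if cmd_type == "ADD":
--             user, number = parts[1], parts[2]
--             if user in phone_book:
--                 expected.append("ERROR")
--             else:
--                 phone_book[user] = number
--                 # Успешное ADD не дает вывода
--
--         elif cmd_type == "DELETE":
--             user = parts[1]
--             if user not in phone_book: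
--                 expected.append("ERROR")
--             else:
--                 del phone_book[user]
--                 # Успешное DELETE не дает вывода
--
--         elif cmd_type == "EDITPHONE":
--             user, number = parts[1], parts[2]
--             if user not in phone_book:
--                 expected.append("ERROR")
--             else:
--                 phone_book[user] = number
--                 # Успешное EDITPHONE не дает вывода
--
--         elif cmd_type == "PRINT":
--             user = parts[1]
--             if user not in phone_book:
--                 expected.append("ERROR")
--             else:
--                 expected.append(f"{user} {phone_book[user]}")
--
--     return expected
--
-- def generate_large_test(n):
--     """
--     Генерирует большой тест с N командами и правильными ожидаемыми результатами
--     """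
--     commands = []
--
--     # 1. Добавляем пользователей (40%)
--     add_count = n * 4 // 10
--     for i in range(add_count):
--         commands.append(f"ADD USER{i} {1000000 + i}")
--
--     # 2. Пытаемся добавить существующих (10%)
--     error_add_count = n // 10
--     for i in range(error_add_count):
--         commands.append(f"ADD USER{i} {2000000 + i}")  # Эти пользователи уже существуют
--
--     # 3. Выводим пользователей (15%)
--     print_count = n * 15 // 100
--     for i in range(print_count):
--         commands.append(f"PRINT USER{i}")
--
--     # 4. Редактируем телефоны (10%)
--     edit_count = n // 10
--     for i in range(edit_count):
--         commands.append(f"EDITPHONE USER{i} {3000000 + i}")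
--
--     # 5. Выводим после редактирования (10%)
--     print_after_edit = n // 10
--     for i in range(print_after_edit):
--         commands.append(f"PRINT USER{i}")
--
--     # 6. Удаляем пользователей (10%)
--     delete_count = n // 10
--     for i in range(delete_count):
--         commands.append(f"DELETE USER{i}")
--
--     # 7. Ошибки с удаленными пользователями (5%)
--     error_count = n - len(commands)
--     for i in range(error_count):
--         # Чередуем разные команды с удаленными пользователями
--         if i % 3 == 0:
--             commands.append(f"PRINT USER{i}")
--         elif i % 3 == 1:
--             commands.append(f"DELETE USER{i}")
--         else:
--             commands.append(f"EDITPHONE USER{i} {4000000 + i}")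
--
--     # Обрезаем до точного n
--     commands = commands[:n]
--
--     # Вычисляем ожидаемый вывод
--     expected = calculate_expected_output(commands)
--
--     return commands, expected
-- ===== SOURCE B (Python) =====
-- def generate_large_test(n):
--     """
--     One-pass generator: builds each command and its expected output together,
--     maintaining the phone book while generating (no second parsing pass).
--     """
--     commands = []
--     expected = []
--     phone_book = {}
--
--     def do_add(user, number):
--         commands.append(f"ADD {user} {number}")
--         if user in phone_book:
--             expected.append("ERROR")
--         else:
--             phone_book[user] = str(number)
--
--     def do_delete(user):
--         commands.append(f"DELETE {user}")
--         if user in phone_book: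
--             del phone_book[user]
--         else:
--             expected.append("ERROR")
--
--     def do_edit(user, number):
--         commands.append(f"EDITPHONE {user} {number}")
--         if user in phone_book:
--             phone_book[user] = str(number)
--         else:
--             expected.append("ERROR")
--
--     def do_print(user):
--         commands.append(f"PRINT {user}")
--         if user in phone_book:
--             expected.append(f"{user} {phone_book[user]}")
--         else:
--             expected.append("ERROR")
--
--     for i in range(n * 4 // 10):
--         do_add(f"USER{i}", 1000000 + i)
--     for i in range(n // 10):
--         do_add(f"USER{i}", 2000000 + i)
--     for i in range(n * 15 // 100):
--         do_print(f"USER{i}")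
--     for i in range(n // 10):
--         do_edit(f"USER{i}", 3000000 + i)
--     for i in range(n // 10):
--         do_print(f"USER{i}")
--     for i in range(n // 10):
--         do_delete(f"USER{i}")
--     for i in range(n - len(commands)):
--         if i % 3 == 0:
--             do_print(f"USER{i}")
--         elif i % 3 == 1:
--             do_delete(f"USER{i}")
--         else:
--             do_edit(f"USER{i}", 4000000 + i)
--
--     return commands, expected
-- ===== Notes on version B (the rewrite author's own statement) =====
-- stated objective: simpler
-- what changed: B fuses A's two passes into one: it maintains the phone book while generating, so each command's expected output is produced at creation time, eliminating calculate_expected_output's split-and-parse second pass and the final truncation (the phases already sum to n).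
import Mathlib
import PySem

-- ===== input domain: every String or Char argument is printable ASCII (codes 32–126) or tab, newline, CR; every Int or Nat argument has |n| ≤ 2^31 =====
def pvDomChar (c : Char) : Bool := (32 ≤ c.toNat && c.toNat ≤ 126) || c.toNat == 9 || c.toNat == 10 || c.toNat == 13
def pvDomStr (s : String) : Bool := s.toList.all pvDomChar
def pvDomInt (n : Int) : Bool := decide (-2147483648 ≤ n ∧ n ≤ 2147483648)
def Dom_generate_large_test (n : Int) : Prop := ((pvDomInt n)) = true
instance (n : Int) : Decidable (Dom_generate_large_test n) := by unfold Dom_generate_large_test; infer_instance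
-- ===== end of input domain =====

set_option maxRecDepth 8192

-- B fuses generation and checking into one pass (commands, expected and the phone book
-- maintained together), removing A's separate parse-and-simulate second pass; objective: simpler.

-- ===== PORT A =====
-- the body of calculate_expected_output's loop; parts[0]/parts[1]/parts[2] and
-- phone_book[user] are ported with getD: on every command this program generates the
-- index is in range and the key present, so the default is never used (exact here)
def calcStep (st : PySem.Dict String String × List String) (command : String) :
    PySem.Dict String String × List String :=
  let phone_book := st.1
  let expected := st.2
  let parts := PySem.Str.split₀ command
  let cmd_type := parts.getD 0 ""
  if cmd_type = "ADD" then
    let user := parts.getD 1 ""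
    let number := parts.getD 2 ""
    if phone_book.contains user then (phone_book, expected ++ ["ERROR"])
    else (phone_book.insert user number, expected)
  else if cmd_type = "DELETE" then
    let user := parts.getD 1 ""
    if ¬ phone_book.contains user then (phone_book, expected ++ ["ERROR"])
    else (phone_book.erase user, expected)
  else if cmd_type = "EDITPHONE" then
    let user := parts.getD 1 ""
    let number := parts.getD 2 ""
    if ¬ phone_book.contains user then (phone_book, expected ++ ["ERROR"])
    else (phone_book.insert user number, expected)
  else if cmd_type = "PRINT" then
    let user := parts.getD 1 ""
    if ¬ phone_book.contains user then (phone_book, expected ++ ["ERROR"])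
    else (phone_book, expected ++ [user ++ " " ++ phone_book.getD user ""])
  else st

def calculate_expected_output (commands : List String) : List String :=
  (commands.foldl calcStep (PySem.Dict.empty, [])).2

def generate_large_test (n : Int) : List String × List String :=
  let add_count := PySem.Int.floordiv (n * 4) 10
  let commands := (PySem.List.pyRange 0 add_count 1).foldl
    (fun cs i => cs ++ ["ADD USER" ++ PySem.Int.toStr i ++ " " ++ PySem.Int.toStr (1000000 + i)]) []
  let error_add_count := PySem.Int.floordiv n 10
  let commands := (PySem.List.pyRange 0 error_add_count 1).foldl
    (fun cs i => cs ++ ["ADD USER" ++ PySem.Int.toStr i ++ " " ++ PySem.Int.toStr (2000000 + i)]) commands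
  let print_count := PySem.Int.floordiv (n * 15) 100
  let commands := (PySem.List.pyRange 0 print_count 1).foldl
    (fun cs i => cs ++ ["PRINT USER" ++ PySem.Int.toStr i]) commands
  let edit_count := PySem.Int.floordiv n 10
  let commands := (PySem.List.pyRange 0 edit_count 1).foldl
    (fun cs i => cs ++ ["EDITPHONE USER" ++ PySem.Int.toStr i ++ " " ++ PySem.Int.toStr (3000000 + i)]) commands
  let print_after_edit := PySem.Int.floordiv n 10
  let commands := (PySem.List.pyRange 0 print_after_edit 1).foldl
    (fun cs i => cs ++ ["PRINT USER" ++ PySem.Int.toStr i]) commands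
  let delete_count := PySem.Int.floordiv n 10
  let commands := (PySem.List.pyRange 0 delete_count 1).foldl
    (fun cs i => cs ++ ["DELETE USER" ++ PySem.Int.toStr i]) commands
  let error_count := n - commands.length
  let commands := (PySem.List.pyRange 0 error_count 1).foldl
    (fun cs i =>
      if PySem.Int.mod i 3 = 0 then cs ++ ["PRINT USER" ++ PySem.Int.toStr i]
      else if PySem.Int.mod i 3 = 1 then cs ++ ["DELETE USER" ++ PySem.Int.toStr i]
      else cs ++ ["EDITPHONE USER" ++ PySem.Int.toStr i ++ " " ++ PySem.Int.toStr (4000000 + i)]) commands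
  let commands := PySem.List.slice commands none (some n)
  (commands, calculate_expected_output commands)

-- ===== PORT B =====
-- state of B's single pass: (commands, expected, phone_book)
def do_add (st : List String × List String × PySem.Dict String String) (user : String) (number : Int) :
    List String × List String × PySem.Dict String String :=
  let cs := st.1 ++ ["ADD " ++ user ++ " " ++ PySem.Int.toStr number]
  if st.2.2.contains user then (cs, st.2.1 ++ ["ERROR"], st.2.2)
  else (cs, st.2.1, st.2.2.insert user (PySem.Int.toStr number))

def do_delete (st : List String × List String × PySem.Dict String String) (user : String) :
    List String × List String × PySem.Dict String String :=
  let cs := st.1 ++ ["DELETE " ++ user]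
  if st.2.2.contains user then (cs, st.2.1, st.2.2.erase user)
  else (cs, st.2.1 ++ ["ERROR"], st.2.2)

def do_edit (st : List String × List String × PySem.Dict String String) (user : String) (number : Int) :
    List String × List String × PySem.Dict String String :=
  let cs := st.1 ++ ["EDITPHONE " ++ user ++ " " ++ PySem.Int.toStr number]
  if st.2.2.contains user then (cs, st.2.1, st.2.2.insert user (PySem.Int.toStr number))
  else (cs, st.2.1 ++ ["ERROR"], st.2.2)

def do_print (st : List String × List String × PySem.Dict String String) (user : String) :
    List String × List String × PySem.Dict String String :=
  let cs := st.1 ++ ["PRINT " ++ user]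
  if st.2.2.contains user then (cs, st.2.1 ++ [user ++ " " ++ st.2.2.getD user ""], st.2.2)
  else (cs, st.2.1 ++ ["ERROR"], st.2.2)

def generate_large_test_alt (n : Int) : List String × List String :=
  let st : List String × List String × PySem.Dict String String := ([], [], PySem.Dict.empty)
  let st := (PySem.List.pyRange 0 (PySem.Int.floordiv (n * 4) 10) 1).foldl
    (fun st i => do_add st ("USER" ++ PySem.Int.toStr i) (1000000 + i)) st
  let st := (PySem.List.pyRange 0 (PySem.Int.floordiv n 10) 1).foldl
    (fun st i => do_add st ("USER" ++ PySem.Int.toStr i) (2000000 + i)) st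
  let st := (PySem.List.pyRange 0 (PySem.Int.floordiv (n * 15) 100) 1).foldl
    (fun st i => do_print st ("USER" ++ PySem.Int.toStr i)) st
  let st := (PySem.List.pyRange 0 (PySem.Int.floordiv n 10) 1).foldl
    (fun st i => do_edit st ("USER" ++ PySem.Int.toStr i) (3000000 + i)) st
  let st := (PySem.List.pyRange 0 (PySem.Int.floordiv n 10) 1).foldl
    (fun st i => do_print st ("USER" ++ PySem.Int.toStr i)) st
  let st := (PySem.List.pyRange 0 (PySem.Int.floordiv n 10) 1).foldl
    (fun st i => do_delete st ("USER" ++ PySem.Int.toStr i)) st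
  let st := (PySem.List.pyRange 0 (n - st.1.length) 1).foldl
    (fun st i =>
      if PySem.Int.mod i 3 = 0 then do_print st ("USER" ++ PySem.Int.toStr i)
      else if PySem.Int.mod i 3 = 1 then do_delete st ("USER" ++ PySem.Int.toStr i)
      else do_edit st ("USER" ++ PySem.Int.toStr i) (4000000 + i)) st
  (st.1, st.2.1)

-- ===== PRECONDITION & SPEC =====
def Spec_generate_large_test (n : Int) (out : List String × List String) : Prop := out = generate_large_test_alt n
instance (n : Int) (out : List String × List String) : Decidable (Spec_generate_large_test n out) := by unfold Spec_generate_large_test; infer_instance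

-- ===== CLAIM (what is proved, stated in full; the proofs are below) =====
def Claim_equal_generate_large_test : Prop := ∀ (n : Int), Dom_generate_large_test n → Spec_generate_large_test n (generate_large_test n)

-- ===== LEMMAS AND PROOFS =====

theorem digitChar_nonspace (k : Nat) : PySem.Chars.isspace (Nat.digitChar k) = false := by
  match k with
  | 0 => rfl
  | 1 => rfl
  | 2 => rfl
  | 3 => rfl
  | 4 => rfl
  | 5 => rfl
  | 6 => rfl
  | 7 => rfl
  | 8 => rfl
  | 9 => rfl
  | 10 => rfl
  | 11 => rfl
  | 12 => rfl
  | 13 => rfl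
  | 14 => rfl
  | 15 => rfl
  | _+16 => rfl

theorem toDigitsCore_nonspace : ∀ (fuel n : Nat) (ds : List Char),
    (∀ c ∈ ds, PySem.Chars.isspace c = false) →
    ∀ c ∈ Nat.toDigitsCore 10 fuel n ds, PySem.Chars.isspace c = false := by
  intro fuel
  induction fuel with
  | zero => intro n ds h; simpa [Nat.toDigitsCore] using h
  | succ fuel ih =>
    intro n ds h
    rw [Nat.toDigitsCore]
    split
    · intro c hc
      rcases List.mem_cons.mp hc with rfl | hc
      · exact digitChar_nonspace _
      · exact h _ hc
    · exact ih _ _ (by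
        intro c hc
        rcases List.mem_cons.mp hc with rfl | hc
        · exact digitChar_nonspace _
        · exact h _ hc)

theorem toDigitsCore_eq_nil : ∀ (fuel n : Nat) (ds : List Char),
    Nat.toDigitsCore 10 fuel n ds = [] → ds = [] := by
  intro fuel
  induction fuel with
  | zero => intro n ds h; simpa [Nat.toDigitsCore] using h
  | succ fuel ih =>
    intro n ds h
    rw [Nat.toDigitsCore] at h
    split at h
    · exact absurd h (by simp)
    · exact absurd (ih _ _ h) (by simp)

theorem toDigits_ne_nil (m : Nat) : Nat.toDigits 10 m ≠ [] := by
  intro h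
  rw [Nat.toDigits, Nat.toDigitsCore] at h
  split at h
  · simp at h
  · exact absurd (toDigitsCore_eq_nil _ _ _ h) (by simp)

theorem toChars_nonspace (i : Int) : ∀ c ∈ PySem.Int.toChars i, PySem.Chars.isspace c = false := by
  unfold PySem.Int.toChars
  split
  · intro c hc
    rcases List.mem_cons.mp hc with rfl | hc
    · rfl
    · exact toDigitsCore_nonspace _ _ [] (by simp) _ hc
  · exact toDigitsCore_nonspace _ _ [] (by simp)

theorem toChars_ne_nil (i : Int) : PySem.Int.toChars i ≠ [] := by
  unfold PySem.Int.toChars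
  split
  · simp
  · exact toDigits_ne_nil _

theorem go_word (w : List Char) (hw : ∀ c ∈ w, PySem.Chars.isspace c = false) :
    ∀ (rest cur : List Char) (acc : List (List Char)),
    PySem.Chars.split₀.go (w ++ rest) cur acc = PySem.Chars.split₀.go rest (w.reverse ++ cur) acc := by
  induction w with
  | nil => intro rest cur acc; simp
  | cons c w ih =>
    intro rest cur acc
    rw [List.cons_append, PySem.Chars.split₀.go, hw c (by simp)]
    simp only [Bool.false_eq_true, if_false]
    rw [ih (fun d hd => hw d (by simp [hd]))]
    simp

theorem split0_three (w1 w2 w3 : List Char)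
    (h1 : w1 ≠ []) (hw1 : ∀ c ∈ w1, PySem.Chars.isspace c = false)
    (h2 : w2 ≠ []) (hw2 : ∀ c ∈ w2, PySem.Chars.isspace c = false)
    (h3 : w3 ≠ []) (hw3 : ∀ c ∈ w3, PySem.Chars.isspace c = false) :
    PySem.Chars.split₀ (w1 ++ ' ' :: (w2 ++ ' ' :: w3)) = [w1, w2, w3] := by
  unfold PySem.Chars.split₀
  rw [go_word w1 hw1, PySem.Chars.split₀.go]
  simp only [show PySem.Chars.isspace ' ' = true from rfl, if_true, List.append_nil,
    List.isEmpty_iff, List.reverse_reverse]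
  rw [if_neg (by simp [h1] : ¬ _ = ([]:List Char))]
  rw [go_word w2 hw2, PySem.Chars.split₀.go]
  simp only [show PySem.Chars.isspace ' ' = true from rfl, if_true, List.append_nil,
    List.isEmpty_iff, List.reverse_reverse]
  rw [if_neg (by simp [h2] : ¬ _ = ([]:List Char))]
  rw [show w3 = w3 ++ [] by simp, go_word w3 hw3, PySem.Chars.split₀.go]
  simp [h3]

theorem split0_two (w1 w2 : List Char)
    (h1 : w1 ≠ []) (hw1 : ∀ c ∈ w1, PySem.Chars.isspace c = false)
    (h2 : w2 ≠ []) (hw2 : ∀ c ∈ w2, PySem.Chars.isspace c = false) :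
    PySem.Chars.split₀ (w1 ++ ' ' :: w2) = [w1, w2] := by
  unfold PySem.Chars.split₀
  rw [go_word w1 hw1, PySem.Chars.split₀.go]
  simp only [show PySem.Chars.isspace ' ' = true from rfl, if_true, List.append_nil,
    List.isEmpty_iff, List.reverse_reverse]
  rw [if_neg (by simp [h1] : ¬ _ = ([]:List Char))]
  rw [show w2 = w2 ++ [] by simp, go_word w2 hw2, PySem.Chars.split₀.go]
  simp [h2]
theorem ofList_ADD : String.ofList ['A','D','D'] = "ADD" := by decide


theorem parts3 (p : String) (w1 : List Char) (hp : p.toList = w1 ++ [' ']) (u : String) (m : Int)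
    (h1 : w1 ≠ []) (hw1 : ∀ c ∈ w1, PySem.Chars.isspace c = false)
    (h2 : u.toList ≠ []) (hw2 : ∀ c ∈ u.toList, PySem.Chars.isspace c = false) :
    PySem.Str.split₀ (p ++ u ++ " " ++ PySem.Int.toStr m) = [String.ofList w1, u, PySem.Int.toStr m] := by
  unfold PySem.Str.split₀
  have : (p ++ u ++ " " ++ PySem.Int.toStr m).toList = w1 ++ ' ' :: (u.toList ++ ' ' :: PySem.Int.toChars m) := by
    simp [String.toList_append, hp, PySem.Int.toList_toStr]
  rw [this, split0_three w1 u.toList (PySem.Int.toChars m) h1 hw1 h2 hw2 (toChars_ne_nil m) (toChars_nonspace m)]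
  simp [String.ofList_toList, PySem.Int.toStr]

theorem parts2 (p : String) (w1 : List Char) (hp : p.toList = w1 ++ [' ']) (u : String)
    (h1 : w1 ≠ []) (hw1 : ∀ c ∈ w1, PySem.Chars.isspace c = false)
    (h2 : u.toList ≠ []) (hw2 : ∀ c ∈ u.toList, PySem.Chars.isspace c = false) :
    PySem.Str.split₀ (p ++ u) = [String.ofList w1, u] := by
  unfold PySem.Str.split₀
  have : (p ++ u).toList = w1 ++ ' ' :: u.toList := by
    simp [String.toList_append, hp]
  rw [this, split0_two w1 u.toList h1 hw1 h2 hw2]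
  simp [String.ofList_toList]

theorem do_add_spec (st : List String × List String × PySem.Dict String String) (u : String) (m : Int)
    (h2 : u.toList ≠ []) (hw2 : ∀ c ∈ u.toList, PySem.Chars.isspace c = false) :
    do_add st u m = (st.1 ++ ["ADD " ++ u ++ " " ++ PySem.Int.toStr m],
      (calcStep (st.2.2, st.2.1) ("ADD " ++ u ++ " " ++ PySem.Int.toStr m)).2,
      (calcStep (st.2.2, st.2.1) ("ADD " ++ u ++ " " ++ PySem.Int.toStr m)).1) := by
  unfold do_add calcStep
  rw [parts3 "ADD " ['A','D','D'] (by decide) u m (by simp) (by simp [PySem.Chars.isspace]) h2 hw2, ofList_ADD]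
  by_cases h : st.2.2.contains u <;> simp [h]

theorem do_edit_spec (st : List String × List String × PySem.Dict String String) (u : String) (m : Int)
    (h2 : u.toList ≠ []) (hw2 : ∀ c ∈ u.toList, PySem.Chars.isspace c = false) :
    do_edit st u m = (st.1 ++ ["EDITPHONE " ++ u ++ " " ++ PySem.Int.toStr m],
      (calcStep (st.2.2, st.2.1) ("EDITPHONE " ++ u ++ " " ++ PySem.Int.toStr m)).2,
      (calcStep (st.2.2, st.2.1) ("EDITPHONE " ++ u ++ " " ++ PySem.Int.toStr m)).1) := by
  unfold do_edit calcStep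
  rw [parts3 "EDITPHONE " ['E','D','I','T','P','H','O','N','E'] (by decide) u m (by simp) (by simp [PySem.Chars.isspace]) h2 hw2]
  rw [show String.ofList ['E','D','I','T','P','H','O','N','E'] = "EDITPHONE" from by decide]
  by_cases h : st.2.2.contains u <;> simp [h]

theorem do_delete_spec (st : List String × List String × PySem.Dict String String) (u : String)
    (h2 : u.toList ≠ []) (hw2 : ∀ c ∈ u.toList, PySem.Chars.isspace c = false) :
    do_delete st u = (st.1 ++ ["DELETE " ++ u],
      (calcStep (st.2.2, st.2.1) ("DELETE " ++ u)).2,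
      (calcStep (st.2.2, st.2.1) ("DELETE " ++ u)).1) := by
  unfold do_delete calcStep
  rw [parts2 "DELETE " ['D','E','L','E','T','E'] (by decide) u (by simp) (by simp [PySem.Chars.isspace]) h2 hw2]
  rw [show String.ofList ['D','E','L','E','T','E'] = "DELETE" from by decide]
  by_cases h : st.2.2.contains u <;> simp [h]

theorem do_print_spec (st : List String × List String × PySem.Dict String String) (u : String)
    (h2 : u.toList ≠ []) (hw2 : ∀ c ∈ u.toList, PySem.Chars.isspace c = false) :
    do_print st u = (st.1 ++ ["PRINT " ++ u],
      (calcStep (st.2.2, st.2.1) ("PRINT " ++ u)).2,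
      (calcStep (st.2.2, st.2.1) ("PRINT " ++ u)).1) := by
  unfold do_print calcStep
  rw [parts2 "PRINT " ['P','R','I','N','T'] (by decide) u (by simp) (by simp [PySem.Chars.isspace]) h2 hw2]
  rw [show String.ofList ['P','R','I','N','T'] = "PRINT" from by decide]
  by_cases h : st.2.2.contains u <;> simp [h]

theorem fuse : ∀ (R : List Int) (g : (List String × List String × PySem.Dict String String) → Int → (List String × List String × PySem.Dict String String)) (f : Int → String),
    (∀ st i, i ∈ R → g st i = (st.1 ++ [f i],
      (calcStep (st.2.2, st.2.1) (f i)).2, (calcStep (st.2.2, st.2.1) (f i)).1)) →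
    ∀ st, R.foldl g st = (st.1 ++ R.map f,
      (List.foldl calcStep (st.2.2, st.2.1) (R.map f)).2,
      (List.foldl calcStep (st.2.2, st.2.1) (R.map f)).1) := by
  intro R
  induction R with
  | nil => intro g f h st; simp
  | cons a R ih =>
    intro g f h st
    rw [List.foldl_cons, h st a (by simp), ih g f (fun st i hi => h st i (by simp [hi]))]
    simp [List.foldl_cons]

theorem user_ne (i : Int) : ("USER" ++ PySem.Int.toStr i).toList ≠ [] := by
  simp [String.toList_append]

theorem user_nonspace (i : Int) :
    ∀ c ∈ ("USER" ++ PySem.Int.toStr i).toList, PySem.Chars.isspace c = false := by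
  intro c hc
  rw [String.toList_append] at hc
  rcases List.mem_append.mp hc with hc | hc
  · rw [show "USER".toList = ['U','S','E','R'] from by decide] at hc
    fin_cases hc <;> rfl
  · rw [PySem.Int.toList_toStr] at hc
    exact toChars_nonspace i c hc

set_option maxHeartbeats 1000000 in
theorem phase_add (c off : Int) (st : List String × List String × PySem.Dict String String) :
    (PySem.List.pyRange 0 c 1).foldl (fun st i => do_add st ("USER" ++ PySem.Int.toStr i) (off + i)) st =
      (st.1 ++ (PySem.List.pyRange 0 c 1).map (fun i => "ADD " ++ ("USER" ++ PySem.Int.toStr i) ++ " " ++ PySem.Int.toStr (off + i)),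
       (List.foldl calcStep (st.2.2, st.2.1) ((PySem.List.pyRange 0 c 1).map (fun i => "ADD " ++ ("USER" ++ PySem.Int.toStr i) ++ " " ++ PySem.Int.toStr (off + i)))).2,
       (List.foldl calcStep (st.2.2, st.2.1) ((PySem.List.pyRange 0 c 1).map (fun i => "ADD " ++ ("USER" ++ PySem.Int.toStr i) ++ " " ++ PySem.Int.toStr (off + i)))).1) :=
  fuse _ _ _ (fun st i _ => do_add_spec st ("USER" ++ PySem.Int.toStr i) (off + i) (user_ne i) (user_nonspace i)) st

set_option maxHeartbeats 1000000 in
theorem phase_edit (c off : Int) (st : List String × List String × PySem.Dict String String) :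
    (PySem.List.pyRange 0 c 1).foldl (fun st i => do_edit st ("USER" ++ PySem.Int.toStr i) (off + i)) st =
      (st.1 ++ (PySem.List.pyRange 0 c 1).map (fun i => "EDITPHONE " ++ ("USER" ++ PySem.Int.toStr i) ++ " " ++ PySem.Int.toStr (off + i)),
       (List.foldl calcStep (st.2.2, st.2.1) ((PySem.List.pyRange 0 c 1).map (fun i => "EDITPHONE " ++ ("USER" ++ PySem.Int.toStr i) ++ " " ++ PySem.Int.toStr (off + i)))).2,
       (List.foldl calcStep (st.2.2, st.2.1) ((PySem.List.pyRange 0 c 1).map (fun i => "EDITPHONE " ++ ("USER" ++ PySem.Int.toStr i) ++ " " ++ PySem.Int.toStr (off + i)))).1) :=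
  fuse _ _ _ (fun st i _ => do_edit_spec st ("USER" ++ PySem.Int.toStr i) (off + i) (user_ne i) (user_nonspace i)) st

set_option maxHeartbeats 1000000 in
theorem phase_print (c : Int) (st : List String × List String × PySem.Dict String String) :
    (PySem.List.pyRange 0 c 1).foldl (fun st i => do_print st ("USER" ++ PySem.Int.toStr i)) st =
      (st.1 ++ (PySem.List.pyRange 0 c 1).map (fun i => "PRINT " ++ ("USER" ++ PySem.Int.toStr i)),
       (List.foldl calcStep (st.2.2, st.2.1) ((PySem.List.pyRange 0 c 1).map (fun i => "PRINT " ++ ("USER" ++ PySem.Int.toStr i)))).2,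
       (List.foldl calcStep (st.2.2, st.2.1) ((PySem.List.pyRange 0 c 1).map (fun i => "PRINT " ++ ("USER" ++ PySem.Int.toStr i)))).1) :=
  fuse _ _ _ (fun st i _ => do_print_spec st ("USER" ++ PySem.Int.toStr i) (user_ne i) (user_nonspace i)) st

set_option maxHeartbeats 1000000 in
theorem phase_delete (c : Int) (st : List String × List String × PySem.Dict String String) :
    (PySem.List.pyRange 0 c 1).foldl (fun st i => do_delete st ("USER" ++ PySem.Int.toStr i)) st =
      (st.1 ++ (PySem.List.pyRange 0 c 1).map (fun i => "DELETE " ++ ("USER" ++ PySem.Int.toStr i)),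
       (List.foldl calcStep (st.2.2, st.2.1) ((PySem.List.pyRange 0 c 1).map (fun i => "DELETE " ++ ("USER" ++ PySem.Int.toStr i)))).2,
       (List.foldl calcStep (st.2.2, st.2.1) ((PySem.List.pyRange 0 c 1).map (fun i => "DELETE " ++ ("USER" ++ PySem.Int.toStr i)))).1) :=
  fuse _ _ _ (fun st i _ => do_delete_spec st ("USER" ++ PySem.Int.toStr i) (user_ne i) (user_nonspace i)) st

def mixCmdFn : Int → String := fun i =>
  if PySem.Int.mod i 3 = 0 then "PRINT " ++ ("USER" ++ PySem.Int.toStr i)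
  else if PySem.Int.mod i 3 = 1 then "DELETE " ++ ("USER" ++ PySem.Int.toStr i)
  else "EDITPHONE " ++ ("USER" ++ PySem.Int.toStr i) ++ " " ++ PySem.Int.toStr (4000000 + i)

set_option maxHeartbeats 1000000 in
theorem phase_mix (e : Int) (st : List String × List String × PySem.Dict String String) :
    (PySem.List.pyRange 0 e 1).foldl (fun st i =>
      if PySem.Int.mod i 3 = 0 then do_print st ("USER" ++ PySem.Int.toStr i)
      else if PySem.Int.mod i 3 = 1 then do_delete st ("USER" ++ PySem.Int.toStr i)
      else do_edit st ("USER" ++ PySem.Int.toStr i) (4000000 + i)) st =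
      (st.1 ++ (PySem.List.pyRange 0 e 1).map mixCmdFn,
       (List.foldl calcStep (st.2.2, st.2.1) ((PySem.List.pyRange 0 e 1).map mixCmdFn)).2,
       (List.foldl calcStep (st.2.2, st.2.1) ((PySem.List.pyRange 0 e 1).map mixCmdFn)).1) := by
  refine fuse _ _ _ (fun st i _ => ?_) st
  simp only [mixCmdFn]
  split_ifs with h1 h2
  · exact do_print_spec st _ (user_ne i) (user_nonspace i)
  · exact do_delete_spec st _ (user_ne i) (user_nonspace i)
  · exact do_edit_spec st _ _ (user_ne i) (user_nonspace i)

theorem phaseA_mix (e : Int) (cs0 : List String) :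
    (PySem.List.pyRange 0 e 1).foldl (fun cs i =>
      if PySem.Int.mod i 3 = 0 then cs ++ ["PRINT USER" ++ PySem.Int.toStr i]
      else if PySem.Int.mod i 3 = 1 then cs ++ ["DELETE USER" ++ PySem.Int.toStr i]
      else cs ++ ["EDITPHONE USER" ++ PySem.Int.toStr i ++ " " ++ PySem.Int.toStr (4000000 + i)]) cs0 =
      cs0 ++ (PySem.List.pyRange 0 e 1).map (fun i =>
        if PySem.Int.mod i 3 = 0 then "PRINT USER" ++ PySem.Int.toStr i
        else if PySem.Int.mod i 3 = 1 then "DELETE USER" ++ PySem.Int.toStr i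
        else "EDITPHONE USER" ++ PySem.Int.toStr i ++ " " ++ PySem.Int.toStr (4000000 + i)) := by
  rw [PySem.List.foldl_congr_mem _ _
      (fun cs i => cs ++ [if PySem.Int.mod i 3 = 0 then "PRINT USER" ++ PySem.Int.toStr i
        else if PySem.Int.mod i 3 = 1 then "DELETE USER" ++ PySem.Int.toStr i
        else "EDITPHONE USER" ++ PySem.Int.toStr i ++ " " ++ PySem.Int.toStr (4000000 + i)]) cs0
      (by intro acc x _
          beta_reduce
          split_ifs <;> rfl)]
  exact PySem.List.foldl_append_singleton_eq_map _ _ _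

theorem add_cmd_eq (i m : Int) :
    "ADD USER" ++ PySem.Int.toStr i ++ " " ++ PySem.Int.toStr m =
      "ADD " ++ ("USER" ++ PySem.Int.toStr i) ++ " " ++ PySem.Int.toStr m := by
  rw [← String.append_assoc, show ("ADD " ++ "USER" : String) = "ADD USER" from by decide]

theorem edit_cmd_eq (i m : Int) :
    "EDITPHONE USER" ++ PySem.Int.toStr i ++ " " ++ PySem.Int.toStr m =
      "EDITPHONE " ++ ("USER" ++ PySem.Int.toStr i) ++ " " ++ PySem.Int.toStr m := by
  rw [← String.append_assoc, show ("EDITPHONE " ++ "USER" : String) = "EDITPHONE USER" from by decide]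

theorem print_cmd_eq (i : Int) :
    "PRINT USER" ++ PySem.Int.toStr i = "PRINT " ++ ("USER" ++ PySem.Int.toStr i) := by
  rw [← String.append_assoc, show ("PRINT " ++ "USER" : String) = "PRINT USER" from by decide]

theorem delete_cmd_eq (i : Int) :
    "DELETE USER" ++ PySem.Int.toStr i = "DELETE " ++ ("USER" ++ PySem.Int.toStr i) := by
  rw [← String.append_assoc, show ("DELETE " ++ "USER" : String) = "DELETE USER" from by decide]

theorem pyRange_nonpos (c : Int) (h : c ≤ 0) : PySem.List.pyRange 0 c 1 = [] := by
  unfold PySem.List.pyRange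
  simp [show ¬(0:Int) < c by omega]

theorem length_pyRange (c : Int) : (PySem.List.pyRange 0 c 1).length = c.toNat := by
  by_cases h : c ≤ 0
  · rw [pyRange_nonpos c h]; simp; omega
  · rw [show c = ((c.toNat : Nat) : Int) from by omega, PySem.List.pyRange_zero_natCast]
    simp
    omega

theorem slice_full (xs : List String) (n : Int) (h : (xs.length : Int) ≤ n) :
    PySem.List.slice xs none (some n) = xs := by
  unfold PySem.List.slice PySem.List.clampIdx
  simp only [show ¬ n < 0 by omega, if_false]
  simp [show min n.toNat xs.length = xs.length from by omega]

set_option maxHeartbeats 2000000 in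
theorem AB_eq_neg (n : Int) (hn : n < 0) : generate_large_test n = generate_large_test_alt n := by
  have h4 : PySem.Int.floordiv (n*4) 10 ≤ 0 := by
    rw [PySem.Int.floordiv_eq_ediv_of_pos (by norm_num)]; omega
  have h1 : PySem.Int.floordiv n 10 ≤ 0 := by
    rw [PySem.Int.floordiv_eq_ediv_of_pos (by norm_num)]; omega
  have h15 : PySem.Int.floordiv (n*15) 100 ≤ 0 := by
    rw [PySem.Int.floordiv_eq_ediv_of_pos (by norm_num)]; omega
  unfold generate_large_test generate_large_test_alt calculate_expected_output
  simp only [pyRange_nonpos _ h4, pyRange_nonpos _ h1, pyRange_nonpos _ h15, List.foldl_nil,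
    List.length_nil]
  simp only [Nat.cast_zero, sub_zero]
  rw [pyRange_nonpos _ hn.le]
  simp [PySem.List.slice]

set_option maxHeartbeats 4000000 in
theorem AB_eq_nonneg (n : Int) (hn : 0 ≤ n) : generate_large_test n = generate_large_test_alt n := by
  unfold generate_large_test generate_large_test_alt calculate_expected_output
  simp only [phase_add, phase_edit, phase_print, phase_delete, phase_mix, phaseA_mix,
    PySem.List.foldl_append_singleton_eq_map,
    List.nil_append, List.length_append, List.length_map, length_pyRange]
  simp only [add_cmd_eq, edit_cmd_eq, print_cmd_eq, delete_cmd_eq]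
  rw [slice_full _ n (by
    simp only [List.length_append, List.length_map, length_pyRange,
      PySem.Int.floordiv_eq_ediv_of_pos (by norm_num : (0:Int) < 10),
      PySem.Int.floordiv_eq_ediv_of_pos (by norm_num : (0:Int) < 100)]
    push_cast
    omega)]
  simp only [List.foldl_append, Prod.mk.eta]
  rfl

-- ===== VERDICT (by name: the statement is the Claim_ definition above) =====
theorem generate_large_test_spec : Claim_equal_generate_large_test := by
  intro n _hdom
  unfold Spec_generate_large_test
  by_cases hn : n < 0
  · exact AB_eq_neg n hn
  · exact AB_eq_nonneg n (by omega)
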